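-- pv_equiv track=rewrite | github.com/sungroup-sjtu/AIMS_Tools | mstools/utils.py | get_TP_corner
-- ===== SOURCE A (Python) =====
-- def get_TP_corner(TP_list: [tuple]) -> [tuple]:
--     TP_corner = []
--     for t, p in TP_list:
--         p_list = [TP[1] for TP in TP_list if TP[0] == t]
--         if min(p_list) < p and max(p_list) > p:
--             continue
--         t_list = [TP[0] for TP in TP_list if TP[1] == p]
--         if min(t_list) < t and max(t_list) > t:
--             continue
--         else:
--             TP_corner.append((t, p))
--     return TP_corner
-- ===== SOURCE B (Python) =====
-- def get_TP_corner(TP_list):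
--     # one pass to build per-t (min p, max p) and per-p (min t, max t), then O(1) lookups
--     pstat = {}
--     tstat = {}
--     for t, p in TP_list:
--         lo, hi = pstat.get(t, (p, p))
--         pstat[t] = (min(lo, p), max(hi, p))
--         lo, hi = tstat.get(p, (t, t))
--         tstat[p] = (min(lo, t), max(hi, t))
--     TP_corner = []
--     for t, p in TP_list:
--         plo, phi = pstat[t]
--         if plo < p < phi:
--             continue
--         tlo, thi = tstat[p]
--         if tlo < t < thi:
--             continue
--         TP_corner.append((t, p))
--     return TP_corner
-- ===== Notes on version B (the rewrite author's own statement) =====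
-- stated objective: faster
-- what changed: B replaces A's per-element O(n) rescans (min/max of a list comprehension for every pair) by two dictionaries of per-t and per-p (min, max) built in a single pass, then filters with O(1) lookups.
import Mathlib
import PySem

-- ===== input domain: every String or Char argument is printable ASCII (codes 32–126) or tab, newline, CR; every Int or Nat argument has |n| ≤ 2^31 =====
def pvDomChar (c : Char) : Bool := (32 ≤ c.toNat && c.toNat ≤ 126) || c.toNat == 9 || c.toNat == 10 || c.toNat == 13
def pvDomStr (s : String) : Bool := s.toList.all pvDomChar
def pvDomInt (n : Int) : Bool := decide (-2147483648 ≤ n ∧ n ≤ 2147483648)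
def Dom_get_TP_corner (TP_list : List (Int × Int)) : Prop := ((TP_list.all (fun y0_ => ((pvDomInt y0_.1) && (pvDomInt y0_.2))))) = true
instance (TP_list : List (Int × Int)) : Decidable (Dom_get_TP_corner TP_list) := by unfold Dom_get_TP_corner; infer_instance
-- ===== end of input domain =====

-- B replaces A's per-element rescans of the whole list by two dictionaries of per-t / per-p
-- (min, max) built in one pass: O(n) instead of O(n^2) (objective: faster, asymptotic).


-- ===== PORT A =====
-- literal port of A: for each (t, p), rescan TP_list for the p-values at this t and the
-- t-values at this p; the 'none' branches of the matches are Python's min/max on an empty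
-- list (unreachable here: the filtered list always contains the current element).
def get_TP_corner (TP_list : List (Int × Int)) : List (Int × Int) :=
  TP_list.foldl (fun TP_corner tp =>
    let t := tp.1
    let p := tp.2
    let p_list := (TP_list.filter (fun TP => TP.1 == t)).map (fun TP => TP.2)
    match PySem.List.min? p_list (fun y => y), PySem.List.max? p_list (fun y => y) with
    | some pmin, some pmax =>
      if pmin < p ∧ pmax > p then TP_corner
      else
        let t_list := (TP_list.filter (fun TP => TP.2 == p)).map (fun TP => TP.1)
        match PySem.List.min? t_list (fun y => y), PySem.List.max? t_list (fun y => y) with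
        | some tmin, some tmax =>
          if tmin < t ∧ tmax > t then TP_corner else TP_corner ++ [(t, p)]
        | _, _ => TP_corner
    | _, _ => TP_corner) []

-- ===== PORT B =====
-- d.get(k, (v, v)) followed by d[k] = (min(lo, v), max(hi, v))
def updStat (d : PySem.Dict Int (Int × Int)) (k v : Int) : PySem.Dict Int (Int × Int) :=
  let lh := d.getD k (v, v)
  d.insert k (min lh.1 v, max lh.2 v)

-- port of B: build pstat (t -> (min p, max p)) and tstat (p -> (min t, max t)) in one pass,
-- then filter with O(1) lookups; 'none' = Python's KeyError (unreachable: every key was inserted).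
def get_TP_corner_alt (TP_list : List (Int × Int)) : List (Int × Int) :=
  let pstat := TP_list.foldl (fun d tp => updStat d tp.1 tp.2) PySem.Dict.empty
  let tstat := TP_list.foldl (fun d tp => updStat d tp.2 tp.1) PySem.Dict.empty
  TP_list.foldl (fun TP_corner tp =>
    match pstat.get? tp.1 with
    | some (plo, phi) =>
      if plo < tp.2 ∧ tp.2 < phi then TP_corner
      else
        match tstat.get? tp.2 with
        | some (tlo, thi) =>
          if tlo < tp.1 ∧ tp.1 < thi then TP_corner else TP_corner ++ [(tp.1, tp.2)]
        | none => TP_corner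
    | none => TP_corner) []

-- ===== PRECONDITION & SPEC =====
def Spec_get_TP_corner (TP_list : List (Int × Int)) (out : List (Int × Int)) : Prop := out = get_TP_corner_alt TP_list
instance (TP_list : List (Int × Int)) (out : List (Int × Int)) : Decidable (Spec_get_TP_corner TP_list out) := by unfold Spec_get_TP_corner; infer_instance

-- ===== CLAIM (what is proved, stated in full; the proofs are below) =====
def Claim_equal_get_TP_corner : Prop := ∀ (TP_list : List (Int × Int)), Dom_get_TP_corner TP_list → Spec_get_TP_corner TP_list (get_TP_corner TP_list)

-- ===== LEMMAS AND PROOFS =====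

-- running (min, max) combiner: what one updStat step does to the value stored at one key
def comb (o : Option (Int × Int)) (v : Int) : Option (Int × Int) :=
  some (match o with | none => (v, v) | some lh => (min lh.1 v, max lh.2 v))

theorem updStat_get? (d : PySem.Dict Int (Int × Int)) (k' v k : Int) :
    (updStat d k' v).get? k = if k = k' then comb (d.get? k') v else d.get? k := by
  unfold updStat comb
  rw [PySem.Dict.get?_insert]
  rcases h : d.get? k' with _ | lh <;>
    simp [PySem.Dict.getD_eq_get?_getD, h]

-- value stored at k after the build loop = fold of comb over the values whose key is k
theorem stat_fold (key val : Int × Int → Int) (ys : List (Int × Int))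
    (d : PySem.Dict Int (Int × Int)) (k : Int) :
    (ys.foldl (fun d tp => updStat d (key tp) (val tp)) d).get? k
      = ((ys.filter (fun tp => key tp == k)).map val).foldl comb (d.get? k) := by
  induction ys generalizing d with
  | nil => rfl
  | cons tp rest ih =>
    simp only [List.foldl_cons, ih, List.filter_cons]
    by_cases h : key tp = k
    · simp [h, updStat_get?]
    · simp [h, updStat_get?, Ne.symm h]

theorem comb_foldl_some (vs : List Int) (a b : Int) :
    vs.foldl comb (some (a, b)) = some (vs.foldl min a, vs.foldl max b) := by
  induction vs generalizing a b with
  | nil => rfl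
  | cons v vs ih => simp [comb, ih]

theorem comb_foldl_cons (v0 : Int) (vs : List Int) :
    (v0 :: vs).foldl comb none = some (vs.foldl min v0, vs.foldl max v0) := by
  simp [comb, comb_foldl_some]

-- ===== VERDICT (by name: the statement is the Claim_ definition above) =====
theorem get_TP_corner_spec : Claim_equal_get_TP_corner := by
  intro TP_list _
  unfold Spec_get_TP_corner get_TP_corner get_TP_corner_alt
  refine (PySem.List.foldl_congr_mem TP_list _ _ [] ?_).symm
  intro acc tp hmem
  -- the per-t statistics at tp.1
  rcases hP : (TP_list.filter (fun TP => TP.1 == tp.1)).map (fun TP => TP.2) with _ | ⟨v0, vs⟩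
  · exfalso
    have : tp ∈ TP_list.filter (fun TP => TP.1 == tp.1) := by
      simp [List.mem_filter, hmem]
    have : tp.2 ∈ (TP_list.filter (fun TP => TP.1 == tp.1)).map (fun TP => TP.2) :=
      List.mem_map_of_mem this
    rw [hP] at this; exact (List.not_mem_nil this)
  · have hpstat :
        (TP_list.foldl (fun d tp => updStat d tp.1 tp.2) PySem.Dict.empty).get? tp.1
          = some (vs.foldl min v0, vs.foldl max v0) := by
      rw [stat_fold (fun tp => tp.1) (fun tp => tp.2)]
      rw [PySem.Dict.get?_empty, hP, comb_foldl_cons]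
    simp only [hpstat, hP, PySem.List.min?_id_cons, PySem.List.max?_id_cons, gt_iff_lt]
    by_cases hc1 : vs.foldl min v0 < tp.2 ∧ tp.2 < vs.foldl max v0
    · simp [hc1]
    · simp only [if_neg hc1]
      -- the per-p statistics at tp.2
      rcases hT : (TP_list.filter (fun TP => TP.2 == tp.2)).map (fun TP => TP.1) with _ | ⟨w0, ws⟩
      · exfalso
        have : tp ∈ TP_list.filter (fun TP => TP.2 == tp.2) := by
          simp [List.mem_filter, hmem]
        have : tp.1 ∈ (TP_list.filter (fun TP => TP.2 == tp.2)).map (fun TP => TP.1) :=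
          List.mem_map_of_mem this
        rw [hT] at this; exact (List.not_mem_nil this)
      · have htstat :
            (TP_list.foldl (fun d tp => updStat d tp.2 tp.1) PySem.Dict.empty).get? tp.2
              = some (ws.foldl min w0, ws.foldl max w0) := by
          rw [stat_fold (fun tp => tp.2) (fun tp => tp.1)]
          rw [PySem.Dict.get?_empty, hT, comb_foldl_cons]
        simp only [htstat, hT, PySem.List.min?_id_cons, PySem.List.max?_id_cons]
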